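-- pv_equiv track=rewrite | github.com/osamalsaidii/python-backend | day 4/index.py | second_largest_list
-- ===== SOURCE A (Python) =====
-- def second_largest_list(list_of_lists):
--     if len(list_of_lists) < 2:
--         return None
--
--     first = second = []
--     first_len = second_len = -1
--
--     for lst in list_of_lists:
--         length = len(lst)
--         if length > first_len:
--             second, second_len = first, first_len
--             first, first_len = lst, length
--         elif first_len > length > second_len:
--             second, second_len = lst, length
--
--     return second if second_len != -1 else None
-- ===== SOURCE B (Python) =====
-- def second_largest_list(list_of_lists):
--     if len(list_of_lists) < 2:
--         return None
--     max1 = max(len(l) for l in list_of_lists)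
--     lower = [len(l) for l in list_of_lists if len(l) < max1]
--     if not lower:
--         return None
--     max2 = max(lower)
--     for l in list_of_lists:
--         if len(l) == max2:
--             return l
-- ===== Notes on version B (the rewrite author's own statement) =====
-- stated objective: simpler
-- what changed: Replaces the single-pass four-variable first/second tracking state machine by three plain passes: take the maximum length, take the maximum length strictly below it (None if absent), and return the first list attaining it.
import Mathlib
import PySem

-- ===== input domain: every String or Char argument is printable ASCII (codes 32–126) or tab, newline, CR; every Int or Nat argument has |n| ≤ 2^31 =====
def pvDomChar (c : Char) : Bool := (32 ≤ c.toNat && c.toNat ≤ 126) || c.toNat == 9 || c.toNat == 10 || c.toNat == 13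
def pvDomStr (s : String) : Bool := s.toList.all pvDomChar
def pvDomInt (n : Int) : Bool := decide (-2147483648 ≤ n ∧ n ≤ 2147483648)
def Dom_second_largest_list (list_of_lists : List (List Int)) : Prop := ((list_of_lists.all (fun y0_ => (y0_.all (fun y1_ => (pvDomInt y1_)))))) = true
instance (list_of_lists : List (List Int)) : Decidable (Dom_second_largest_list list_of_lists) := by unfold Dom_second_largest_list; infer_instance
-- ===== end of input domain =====

-- B replaces A's single-pass four-variable first/second tracking with three plain passes (max length, max length strictly below it, first list attaining it): simpler decomposition, same O(n) cost.

-- ===== PORT A =====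
-- state (first, first_len, second, second_len)
def slStep (st : List Int × Int × List Int × Int) (lst : List Int) : List Int × Int × List Int × Int :=
  let (first, first_len, second, second_len) := st
  let length : Int := lst.length
  if length > first_len then (lst, length, first, first_len)
  else if first_len > length ∧ length > second_len then (first, first_len, lst, length)
  else (first, first_len, second, second_len)

def second_largest_list (list_of_lists : List (List Int)) : Option (List Int) :=
  if list_of_lists.length < 2 then none
  else
    let st := list_of_lists.foldl slStep ([], -1, [], -1)
    if st.2.2.2 ≠ -1 then some st.2.2.1 else none

-- ===== PORT B =====
def second_largest_list_alt (list_of_lists : List (List Int)) : Option (List Int) :=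
  if list_of_lists.length < 2 then none
  else
    let lens : List Int := list_of_lists.map (fun l => (l.length : Int))
    match PySem.List.max? lens (fun y => y) with
    | none => none            -- unreachable: list_of_lists is nonempty
    | some max1 =>
      let lower := lens.filter (fun v => v < max1)
      if lower = [] then none
      else
        match PySem.List.max? lower (fun y => y) with
        | none => none        -- unreachable: lower is nonempty
        | some max2 => list_of_lists.find? (fun l => (l.length : Int) == max2)

-- ===== PRECONDITION & SPEC =====
def Spec_second_largest_list (list_of_lists : List (List Int)) (out : Option (List Int)) : Prop := out = second_largest_list_alt list_of_lists
instance (list_of_lists : List (List Int)) (out : Option (List Int)) : Decidable (Spec_second_largest_list list_of_lists out) := by unfold Spec_second_largest_list; infer_instance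

-- ===== CLAIM (what is proved, stated in full; the proofs are below) =====
def Claim_equal_second_largest_list : Prop := ∀ (list_of_lists : List (List Int)), Dom_second_largest_list list_of_lists → Spec_second_largest_list list_of_lists (second_largest_list list_of_lists)

-- ===== LEMMAS AND PROOFS =====

-- length of a list, as an Int
def lenI (l : List Int) : Int := l.length

-- maximum length over ys (−1 on [])
def M1 (ys : List (List Int)) : Int := (ys.map lenI).foldl max (-1)

-- maximum length strictly below M1 (−1 if none)
def M2 (ys : List (List Int)) : Int := ((ys.filter (fun l => lenI l < M1 ys)).map lenI).foldl max (-1)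

-- first element of length v, or []
def Fst (ys : List (List Int)) (v : Int) : List Int := (ys.find? (fun l => lenI l == v)).getD []

theorem lenI_nonneg (l : List Int) : 0 ≤ lenI l := by simp [lenI]

theorem le_M1 (ys : List (List Int)) : -1 ≤ M1 ys ∧ ∀ y ∈ ys, lenI y ≤ M1 ys := by
  refine ⟨(PySem.List.le_foldl_max (ys.map lenI) (-1)).1, fun y hy => ?_⟩
  exact (PySem.List.le_foldl_max (ys.map lenI) (-1)).2 _ (List.mem_map_of_mem hy)

theorem M1_attained (ys : List (List Int)) (h : M1 ys ≠ -1) : ∃ y ∈ ys, lenI y = M1 ys := by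
  rcases PySem.List.foldl_max_mem (ys.map lenI) (-1) with h1 | h1
  · exact absurd h1 h
  · rcases List.mem_map.mp h1 with ⟨y, hy, hv⟩
    exact ⟨y, hy, hv⟩

theorem M2_attained (ys : List (List Int)) (h : M2 ys ≠ -1) :
    ∃ y ∈ ys, lenI y = M2 ys ∧ lenI y < M1 ys := by
  rcases PySem.List.foldl_max_mem ((ys.filter (fun l => lenI l < M1 ys)).map lenI) (-1) with h1 | h1
  · exact absurd h1 h
  · rcases List.mem_map.mp h1 with ⟨y, hy, hv⟩
    rcases List.mem_filter.mp hy with ⟨hmem, hlt⟩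
    exact ⟨y, hmem, hv, by simpa using hlt⟩

theorem le_M2 (ys : List (List Int)) : -1 ≤ M2 ys ∧ ∀ y ∈ ys, lenI y < M1 ys → lenI y ≤ M2 ys := by
  refine ⟨(PySem.List.le_foldl_max _ (-1)).1, fun y hy hlt => ?_⟩
  exact (PySem.List.le_foldl_max _ (-1)).2 _
    (List.mem_map_of_mem (List.mem_filter.mpr ⟨hy, by simpa using hlt⟩))

theorem M1_append (ys : List (List Int)) (x : List Int) :
    M1 (ys ++ [x]) = max (M1 ys) (lenI x) := by
  simp [M1, List.foldl_append]

theorem Fst_append_of_mem (ys zs : List (List Int)) (v : Int) (h : ∃ y ∈ ys, lenI y = v) :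
    Fst (ys ++ zs) v = Fst ys v := by
  rcases h with ⟨y, hy, hv⟩
  have hs : (ys.find? (fun l => lenI l == v)).isSome := List.find?_isSome.mpr ⟨y, hy, by simp [hv]⟩
  rcases Option.isSome_iff_exists.mp hs with ⟨w, hw⟩
  simp [Fst, List.find?_append, hw]

theorem Fst_append_ne (ys : List (List Int)) (x : List Int) (v : Int) (h : lenI x ≠ v) :
    Fst (ys ++ [x]) v = Fst ys v := by
  simp only [Fst, List.find?_append]
  cases hfind : ys.find? (fun l => lenI l == v) with
  | some w => simp
  | none =>
    have : (lenI x == v) = false := by simpa using h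
    simp [this]


theorem Fst_append_new (ys : List (List Int)) (x : List Int) (v : Int)
    (h : ∀ y ∈ ys, lenI y ≠ v) (hx : lenI x = v) : Fst (ys ++ [x]) v = x := by
  have hn : ys.find? (fun l => lenI l == v) = none :=
    List.find?_eq_none.mpr (fun y hy => by simpa using h y hy)
  have hxv : (lenI x == v) = true := by simp [hx]
  simp [Fst, List.find?_append, hn, List.find?, hxv]

theorem M2_lt_M1 (ys : List (List Int)) (h : -1 < M1 ys) : M2 ys < M1 ys := by
  by_cases h2 : M2 ys = -1
  · omega
  · rcases M2_attained ys h2 with ⟨y, _, hv, hlt⟩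
    omega

theorem M2_append_gt (ys : List (List Int)) (x : List Int) (h : M1 ys < lenI x) :
    M2 (ys ++ [x]) = M1 ys := by
  have h1 : M1 (ys ++ [x]) = lenI x := by rw [M1_append]; omega
  have hfx : (decide (lenI x < lenI x)) = false := by simp
  have hfy : ys.filter (fun l => lenI l < lenI x) = ys :=
    List.filter_eq_self.mpr (fun y hy => by
      have := (le_M1 ys).2 y hy
      simp; omega)
  simp only [M2, h1, List.filter_append, hfy, List.filter_cons, hfx, List.filter_nil,
    ]
  simp [M1]

theorem M2_append_lt (ys : List (List Int)) (x : List Int) (h : lenI x < M1 ys) :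
    M2 (ys ++ [x]) = max (M2 ys) (lenI x) := by
  have h1 : M1 (ys ++ [x]) = M1 ys := by rw [M1_append]; omega
  have hfx : (decide (lenI x < M1 ys)) = true := by simpa using h
  simp only [M2, h1, List.filter_append, List.filter_cons, hfx, List.filter_nil,
    List.map_append, List.foldl_append]
  simp

theorem M2_append_eq (ys : List (List Int)) (x : List Int) (h : lenI x = M1 ys) :
    M2 (ys ++ [x]) = M2 ys := by
  have h1 : M1 (ys ++ [x]) = M1 ys := by rw [M1_append]; omega
  have hfx : (decide (lenI x < M1 ys)) = false := by simp; omega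
  simp only [M2, h1, List.filter_append, List.filter_cons, hfx, List.filter_nil]
  simp

theorem foldA (ys : List (List Int)) :
    ys.foldl slStep ([], -1, [], -1) = (Fst ys (M1 ys), M1 ys, Fst ys (M2 ys), M2 ys) := by
  induction ys using List.reverseRecOn with
  | nil => simp [M1, M2, Fst]
  | append_singleton ys x ih =>
    set c := lenI x with hc
    have hc0 : 0 ≤ c := lenI_nonneg x
    have hM1 : M1 (ys ++ [x]) = max (M1 ys) c := M1_append ys x
    rw [List.foldl_append, ih]
    by_cases h1 : c > M1 ys
    · -- x becomes the new first, old first demotes to second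
      have e1 : M1 (ys ++ [x]) = c := by omega
      have e2 : M2 (ys ++ [x]) = M1 ys := M2_append_gt ys x h1
      have eF1 : Fst (ys ++ [x]) c = x :=
        Fst_append_new ys x c (fun y hy => by have := (le_M1 ys).2 y hy; omega) rfl
      have eF2 : Fst (ys ++ [x]) (M1 ys) = Fst ys (M1 ys) :=
        Fst_append_ne ys x (M1 ys) (by omega)
      simp only [List.foldl_cons, List.foldl_nil, slStep, e1, e2, eF1, eF2]
      rw [if_pos (by simpa [hc] using h1)]
      simp [hc, lenI]
    · by_cases h2 : M1 ys > c ∧ c > M2 ys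
      · -- x becomes the new second
        have e1 : M1 (ys ++ [x]) = M1 ys := by omega
        have e2 : M2 (ys ++ [x]) = c := by rw [M2_append_lt ys x h2.1]; omega
        have eF1 : Fst (ys ++ [x]) (M1 ys) = Fst ys (M1 ys) :=
          Fst_append_ne ys x (M1 ys) (by omega)
        have eF2 : Fst (ys ++ [x]) c = x := by
          refine Fst_append_new ys x c (fun y hy hv => ?_) rfl
          have := (le_M2 ys).2 y hy (by omega)
          omega
        simp only [List.foldl_cons, List.foldl_nil, slStep, e1, e2, eF1, eF2]
        rw [if_neg (by simpa [hc] using h1), if_pos (by simpa [hc] using h2)]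
        simp [hc, lenI]
      · -- state unchanged
        have e1 : M1 (ys ++ [x]) = M1 ys := by omega
        have hM1pos : -1 < M1 ys := by omega
        have hlt : M2 ys < M1 ys := M2_lt_M1 ys hM1pos
        by_cases h3 : c = M1 ys
        · have e2 : M2 (ys ++ [x]) = M2 ys := M2_append_eq ys x h3
          have eF1 : Fst (ys ++ [x]) (M1 ys) = Fst ys (M1 ys) :=
            Fst_append_of_mem ys [x] (M1 ys) (M1_attained ys (by omega))
          have eF2 : Fst (ys ++ [x]) (M2 ys) = Fst ys (M2 ys) :=
            Fst_append_ne ys x (M2 ys) (by omega)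
          simp only [List.foldl_cons, List.foldl_nil, slStep, e1, e2, eF1, eF2]
          rw [if_neg (by simpa [hc] using h1), if_neg (by simpa [hc] using h2)]
        · -- c < M1 ys and c ≤ M2 ys
          have hcle : c ≤ M2 ys := by omega
          have e2 : M2 (ys ++ [x]) = M2 ys := by rw [M2_append_lt ys x (by omega)]; omega
          have eF1 : Fst (ys ++ [x]) (M1 ys) = Fst ys (M1 ys) :=
            Fst_append_ne ys x (M1 ys) (by omega)
          have eF2 : Fst (ys ++ [x]) (M2 ys) = Fst ys (M2 ys) := by
            by_cases h4 : c = M2 ys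
            · exact Fst_append_of_mem ys [x] (M2 ys)
                ((M2_attained ys (by omega)).imp (fun y hy => ⟨hy.1, hy.2.1⟩))
            · exact Fst_append_ne ys x (M2 ys) (by omega)
          simp only [List.foldl_cons, List.foldl_nil, slStep, e1, e2, eF1, eF2]
          rw [if_neg (by simpa [hc] using h1), if_neg (by simpa [hc] using h2)]

-- ===== VERDICT (by name: the statement is the Claim_ definition above) =====
theorem foldl_max_cons_nonneg (c : Int) (rest : List Int) (hc : 0 ≤ c) :
    (c :: rest).foldl max (-1) = rest.foldl max c := by
  have : max (-1) c = c := by omega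
  simp [this]

theorem second_largest_list_spec : Claim_equal_second_largest_list := by
  intro xs _
  unfold Spec_second_largest_list second_largest_list second_largest_list_alt
  by_cases hlen : xs.length < 2
  · simp [hlen]
  · cases xs with
    | nil => simp at hlen
    | cons hd tl =>
      have hfun : (fun (l : List Int) => (l.length : Int)) = lenI := rfl
      rw [if_neg hlen, if_neg hlen, hfun]
      -- the first max? computes M1
      have hM1eq : M1 (hd :: tl) = (tl.map lenI).foldl max (lenI hd) := by
        simpa [M1] using foldl_max_cons_nonneg (lenI hd) (tl.map lenI) (lenI_nonneg hd)
      have hmax1 : PySem.List.max? ((hd :: tl).map lenI) (fun y => y) = some (M1 (hd :: tl)) := by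
        rw [List.map_cons, PySem.List.max?_id_cons, hM1eq]
      -- the filtered lengths are the lengths of the filtered lists
      have hlower : ((hd :: tl).map lenI).filter (fun v => v < M1 (hd :: tl)) =
          ((hd :: tl).filter (fun l => lenI l < M1 (hd :: tl))).map lenI := by
        rw [List.filter_map]
        rfl
      simp only [hmax1, hlower, foldA (hd :: tl)]
      by_cases hfe : (hd :: tl).filter (fun l => lenI l < M1 (hd :: tl)) = []
      · -- no length is strictly below the maximum: both sides return none
        have hM2 : M2 (hd :: tl) = -1 := by simp [M2, hfe]
        simp [hfe, hM2]
      · -- lower is nonempty: both sides return the first list of length M2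
        rcases List.exists_cons_of_ne_nil hfe with ⟨f0, ft, hF⟩
        have hf0mem : f0 ∈ (hd :: tl).filter (fun l => lenI l < M1 (hd :: tl)) := by
          rw [hF]; exact List.mem_cons_self
        have hf0 := List.mem_filter.mp hf0mem
        have hM2ge : lenI f0 ≤ M2 (hd :: tl) :=
          (le_M2 (hd :: tl)).2 f0 hf0.1 (by simpa using hf0.2)
        have hM2ne : M2 (hd :: tl) ≠ -1 := by have := lenI_nonneg f0; omega
        have hmax2 : PySem.List.max? (((hd :: tl).filter
            (fun l => lenI l < M1 (hd :: tl))).map lenI) (fun y => y) = some (M2 (hd :: tl)) := by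
          rw [hF, List.map_cons, PySem.List.max?_id_cons, M2, hF, List.map_cons,
            foldl_max_cons_nonneg (lenI f0) (ft.map lenI) (lenI_nonneg f0)]
        have hne : ((hd :: tl).filter (fun l => lenI l < M1 (hd :: tl))).map lenI ≠ [] := by
          simp [hF]
        rw [if_neg hne, hmax2]
        -- A returns some (Fst …); B's find? succeeds with the same element
        have hsome : ((hd :: tl).find? (fun l => lenI l == M2 (hd :: tl))).isSome := by
          rcases M2_attained (hd :: tl) hM2ne with ⟨y, hy, hv, _⟩
          exact List.find?_isSome.mpr ⟨y, hy, by simp [hv]⟩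
        rw [if_pos (by simpa using hM2ne)]
        cases hfind : (hd :: tl).find? (fun l => lenI l == M2 (hd :: tl)) with
        | none => rw [hfind] at hsome; simp at hsome
        | some w =>
          simp only [lenI] at hfind
          simp [Fst, lenI, hfind]
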